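-- pv_equiv track=rewrite | github.com/ThatOneBonk/Logwork | reporters/handlers.py | assemble_output
-- ===== SOURCE A (Python) =====
-- from collections import defaultdict
--
-- def assemble_output(data: dict) -> str:
--     """
--     Formats `data` into a human-readable table for output.
--
--     Args:
--         data (dict): The dataset that needs to be formatted.
--             Example:
--             {
--                 "/example1/": {"INFO": 20, "ERROR": 10},
--                 "/example2/": {"INFO": 15, "ERROR": 5}
--             }
--
--     Returns:
--         str: A user-friendly table. Example output:
--
--             Total requests: 50
--
--             HANDLER     DEBUG   INFO    WARNING     ERROR   CRITICAL
--             /example1/  0       20      0           10      0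
--             /example2/  0       15      0           5       0
--                         0       35      0           15      0
--
--     """
--     sorted_log_data = dict(sorted(data.items()))
--     log_levels = ['DEBUG', 'INFO', 'WARNING', 'ERROR', 'CRITICAL']
--     output = ""
--     total_counts = defaultdict(int)
--
--     header = f"{'HANDLER':<25}" + "".join(f"{lvl:<10}" for lvl in log_levels)
--     output += header + "\n"
--
--     for handler, counts in sorted_log_data.items():
--         row = [handler.ljust(25)]
--         for level in log_levels:
--             value = counts.get(level, 0)
--             total_counts[level] += value
--             row.append(str(value).ljust(10))
--         output += "".join(row) + "\n"
--
--     total_row = ["".ljust(25)] + [str(total_counts[level]).ljust(10) for level in log_levels]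
--     output += "".join(total_row)
--
--     total_requests = sum(total_counts.values())
--     output = f"Total requests: {total_requests}\n\n" + output
--
--     return output
-- ===== SOURCE B (Python) =====
-- LOG_LEVELS = ['DEBUG', 'INFO', 'WARNING', 'ERROR', 'CRITICAL']
--
-- def assemble_output(data: dict) -> str:
--     # Column-major construction: build the table one COLUMN per log level
--     # (five passes over the sorted handlers), then transpose with zip(*cols).
--     handlers = sorted(data)
--     cols = [['HANDLER'] + handlers + ['']]
--     grand = 0
--     for level in LOG_LEVELS:
--         counts = [data[h].get(level, 0) for h in handlers]
--         t = sum(counts)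
--         grand += t
--         cols.append([level] + [str(c) for c in counts] + [str(t)])
--     widths = [25] + [10] * 5
--     body = "\n".join(
--         "".join(cell.ljust(w) for cell, w in zip(row, widths))
--         for row in zip(*cols))
--     return f"Total requests: {grand}\n\n" + body
-- ===== Notes on version B (the rewrite author's own statement) =====
-- stated objective: alternative
-- what changed: B builds the table column-major: one pass per log level over the sorted handlers producing a whole column (with its total at the bottom), then transposes the six columns with zip(*cols) and pads cells by a per-column width list, instead of A's single row-major pass with a running defaultdict totals accumulator.
import Mathlib
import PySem

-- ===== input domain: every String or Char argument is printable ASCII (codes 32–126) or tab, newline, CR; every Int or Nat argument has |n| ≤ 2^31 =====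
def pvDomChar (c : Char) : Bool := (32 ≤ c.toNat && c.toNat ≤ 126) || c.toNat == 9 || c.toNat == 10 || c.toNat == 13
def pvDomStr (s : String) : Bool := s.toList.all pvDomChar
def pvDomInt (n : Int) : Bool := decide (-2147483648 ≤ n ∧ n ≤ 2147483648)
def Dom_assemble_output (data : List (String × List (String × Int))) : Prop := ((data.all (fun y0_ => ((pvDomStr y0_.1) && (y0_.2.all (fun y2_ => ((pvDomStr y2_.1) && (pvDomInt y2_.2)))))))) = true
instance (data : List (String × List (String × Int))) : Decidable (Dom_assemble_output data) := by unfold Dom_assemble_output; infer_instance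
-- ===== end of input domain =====

-- B builds the table column-major (one pass per log level producing a whole column, totals at the
-- bottom of each column) and transposes with zip(*cols), replacing A's row-major single pass with a
-- running defaultdict accumulator (objective: alternative).

-- shared helpers (Python built-ins / module constants):
-- s.ljust(w): exact — pads with spaces on the right, never truncates
def pvLjustC (s : List Char) (w : Nat) : List Char := s ++ List.replicate (w - s.length) ' '
def pvLevels : List String := ["DEBUG", "INFO", "WARNING", "ERROR", "CRITICAL"]

-- ===== PORT A =====
-- the body of A's 'for handler, counts in sorted_log_data.items()' loop (state: output so far, total_counts)
def pvStepA (acc : List Char × PySem.Dict String Int) (hc : String × List (String × Int)) :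
    List Char × PySem.Dict String Int :=
  let row := pvLevels.foldl (fun (r : List Char × PySem.Dict String Int) lvl =>
      let value := PySem.Dict.getD (PySem.Dict.mk hc.2) lvl 0
      (r.1 ++ pvLjustC (PySem.Int.toChars value) 10,
       PySem.Dict.modify r.2 lvl 0 (fun x => x + value)))   -- total_counts[level] += value (defaultdict(int))
    (pvLjustC hc.1.toList 25, acc.2)
  (acc.1 ++ row.1 ++ ['\n'], row.2)

def assemble_output (data : List (String × List (String × Int))) : String :=
  -- dict(sorted(data.items())): with the (Pre_) unique handler keys, sorting items = sorting by key
  let sorted_log_data := PySem.List.sorted data (fun p => p.1) false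
  let header : List Char :=
    pvLjustC "HANDLER".toList 25 ++ (pvLevels.map (fun lvl => pvLjustC lvl.toList 10)).flatten
  let st := sorted_log_data.foldl pvStepA (header ++ ['\n'], PySem.Dict.empty)
  let total_row : List Char :=
    pvLjustC [] 25 ++ (pvLevels.map (fun lvl => pvLjustC (PySem.Int.toChars (st.2.getD lvl 0)) 10)).flatten
  let total_requests : Int := st.2.values.sum
  String.ofList ("Total requests: ".toList ++ PySem.Int.toChars total_requests ++ ['\n', '\n']
             ++ st.1 ++ total_row)

-- ===== PORT B =====
-- zip(*cols): take the heads of all columns while every column is nonempty (exact zip semantics)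
def pvHeadsTails {α : Type} : List (List α) → Option (List α × List (List α))
  | [] => some ([], [])
  | [] :: _ => none
  | (x :: xs) :: rest =>
      match pvHeadsTails rest with
      | some (hs, ts) => some (x :: hs, xs :: ts)
      | none => none

def pvZipNAux {α : Type} : List α → List (List α) → List (List α)
  | [], _ => []
  | x :: xs, rest =>
      match pvHeadsTails rest with
      | some (hs, ts) => (x :: hs) :: pvZipNAux xs ts
      | none => []

def pvZipN {α : Type} : List (List α) → List (List α)
  | [] => []
  | c :: cs => pvZipNAux c cs

def assemble_output_alt (data : List (String × List (String × Int))) : String :=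
  let handlers := PySem.List.sorted (data.map Prod.fst) (fun x => x) false
  -- data[h]: h is drawn from data's keys, so the lookup always finds a value
  let st := pvLevels.foldl (fun (st : List (List (List Char)) × Int) lvl =>
      let counts := handlers.map (fun h =>
        PySem.Dict.getD (PySem.Dict.mk (((PySem.Dict.mk data).get? h).getD [])) lvl 0)
      let t := counts.sum
      (st.1 ++ [lvl.toList :: counts.map PySem.Int.toChars ++ [PySem.Int.toChars t]], st.2 + t))
    ([("HANDLER".toList :: handlers.map String.toList ++ [[]])], 0)
  let widths : List Nat := [25] ++ List.replicate 5 10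
  let body := PySem.Chars.join ['\n'] ((pvZipN st.1).map (fun row =>
      ((List.zip row widths).map (fun cw => pvLjustC cw.1 cw.2)).flatten))
  String.ofList ("Total requests: ".toList ++ PySem.Int.toChars st.2 ++ ['\n', '\n'] ++ body)

-- ===== PRECONDITION & SPEC =====
-- Pre_ excludes association lists with duplicate keys (duplicate handler names, or a duplicate
-- log-level key inside one handler's counts): such lists cannot arise from a Python dict, and the
-- assoc-list reading (first match) and the dict reading (last key wins) disagree on them.
def Pre_assemble_output (data : List (String × List (String × Int))) : Prop :=
  (data.map Prod.fst).Nodup ∧ ∀ p ∈ data, (p.2.map Prod.fst).Nodup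
instance (data : List (String × List (String × Int))) : Decidable (Pre_assemble_output data) := by
  unfold Pre_assemble_output; infer_instance
def pvWitness_assemble_output : (List (String × List (String × Int))) :=
  [("/b/", [("INFO", 3), ("ERROR", 1)]), ("/a/", [("DEBUG", 2)])]
def Spec_assemble_output (data : List (String × List (String × Int))) (out : String) : Prop := out = assemble_output_alt data
instance (data : List (String × List (String × Int))) (out : String) : Decidable (Spec_assemble_output data out) := by unfold Spec_assemble_output; infer_instance

-- ===== CLAIM (what is proved, stated in full; the proofs are below) =====
def Claim_equal_assemble_output : Prop := ∀ (data : List (String × List (String × Int))), Dom_assemble_output data → Pre_assemble_output data → Spec_assemble_output data (assemble_output data)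

-- ===== LEMMAS AND PROOFS =====

-- proof-side abbreviations
def pvColv (c : List (String × Int)) (lvl : String) : Int := PySem.Dict.getD (PySem.Dict.mk c) lvl 0

def pvAddTot (d : PySem.Dict String Int) (c : List (String × Int)) : PySem.Dict String Int :=
  pvLevels.foldl (fun d lvl => d.modify lvl 0 (fun x => x + pvColv c lvl)) d

def pvRow (h : String) (c : List (String × Int)) : List Char :=
  pvLjustC h.toList 25 ++ (pvLevels.map (fun lvl => pvLjustC (PySem.Int.toChars (pvColv c lvl)) 10)).flatten

def pvColSum (s : List (String × List (String × Int))) (lvl : String) : Int :=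
  (s.map (fun p => pvColv p.2 lvl)).sum

lemma pvStepA_eq (acc : List Char × PySem.Dict String Int) (hc : String × List (String × Int)) :
    pvStepA acc hc = (acc.1 ++ pvRow hc.1 hc.2 ++ ['\n'], pvAddTot acc.2 hc.2) := by
  simp [pvStepA, pvRow, pvAddTot, pvColv, pvLevels, List.foldl]

lemma pvFoldA (s : List (String × List (String × Int))) (out0 : List Char) (d0 : PySem.Dict String Int) :
    s.foldl pvStepA (out0, d0) =
      (out0 ++ s.flatMap (fun p => pvRow p.1 p.2 ++ ['\n']), s.foldl (fun d p => pvAddTot d p.2) d0) := by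
  induction s generalizing out0 d0 with
  | nil => simp
  | cons p rest ih =>
      simp only [List.foldl_cons, pvStepA_eq, List.flatMap_cons, ih]
      simp [List.append_assoc]

lemma pvGetD_addTot (d : PySem.Dict String Int) (c : List (String × Int)) (lvl : String)
    (h : lvl ∈ pvLevels) : (pvAddTot d c).getD lvl 0 = d.getD lvl 0 + pvColv c lvl := by
  fin_cases h <;> simp [pvAddTot, pvLevels, List.foldl, PySem.Dict.getD_modify]

lemma pvGetD_foldl (s : List (String × List (String × Int))) (d : PySem.Dict String Int) (lvl : String)
    (h : lvl ∈ pvLevels) :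
    (s.foldl (fun d p => pvAddTot d p.2) d).getD lvl 0
      = d.getD lvl 0 + (s.map (fun p => pvColv p.2 lvl)).sum := by
  induction s generalizing d with
  | nil => simp
  | cons p rest ih =>
      simp only [List.foldl_cons, List.map_cons, List.sum_cons, ih]
      rw [pvGetD_addTot d p.2 lvl h]
      ring

lemma pvKeys_addTot (d : PySem.Dict String Int) (c : List (String × Int))
    (h : ∀ lvl ∈ pvLevels, d.contains lvl = true) : (pvAddTot d c).keys = d.keys := by
  have h1 := h "DEBUG" (by simp [pvLevels])
  have h2 := h "INFO" (by simp [pvLevels])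
  have h3 := h "WARNING" (by simp [pvLevels])
  have h4 := h "ERROR" (by simp [pvLevels])
  have h5 := h "CRITICAL" (by simp [pvLevels])
  simp [pvAddTot, pvLevels, List.foldl, PySem.Dict.keys_modify, PySem.Dict.contains_modify,
        PySem.Dict.keys_insert_of_contains, h1, h2, h3, h4, h5]

lemma pvKeys_addTot_empty (c : List (String × Int)) :
    (pvAddTot PySem.Dict.empty c).keys = pvLevels := by
  simp [pvAddTot, pvLevels, List.foldl, PySem.Dict.keys_modify, PySem.Dict.contains_modify,
        PySem.Dict.keys_insert_of_not_contains]

lemma pvKeys_foldl (s : List (String × List (String × Int))) (d : PySem.Dict String Int)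
    (h : d.keys = pvLevels) : (s.foldl (fun d p => pvAddTot d p.2) d).keys = pvLevels := by
  induction s generalizing d with
  | nil => simpa
  | cons p rest ih =>
      simp only [List.foldl_cons]
      refine ih _ ?_
      rw [pvKeys_addTot _ _ (fun lvl hl => (PySem.Dict.contains_iff_mem_keys _ _).2 (h ▸ hl)), h]

-- sorted commutes with mapping out the key
lemma pvMap_insertBy {A G : Type} (f : A → G) (bef : A → A → Bool) (bef' : G → G → Bool)
    (hc : ∀ a b, bef a b = bef' (f a) (f b)) (x : A) (ys : List A) :
    (PySem.List.insertBy bef x ys).map f = PySem.List.insertBy bef' (f x) (ys.map f) := by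
  induction ys with
  | nil => simp [PySem.List.insertBy]
  | cons y ys ih =>
      simp only [PySem.List.insertBy, List.map_cons, hc x y]
      split <;> simp [ih]

lemma pvMap_fst_sorted (data : List (String × List (String × Int))) :
    (PySem.List.sorted data (fun p => p.1) false).map Prod.fst
      = PySem.List.sorted (data.map Prod.fst) (fun x => x) false := by
  rw [PySem.List.sorted_eq_foldl_insertBy, PySem.List.sorted_eq_foldl_insertBy]
  suffices h : ∀ (acc : List (String × List (String × Int))),
      (data.foldl (fun acc x => PySem.List.insertBy (fun a b => decide (a.1 < b.1)) x acc) acc).map Prod.fst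
        = (data.map Prod.fst).foldl (fun acc x => PySem.List.insertBy (fun a b => decide (a < b)) x acc)
            (acc.map Prod.fst) by
    simpa using h []
  induction data with
  | nil => simp
  | cons p rest ih =>
      intro acc
      simp only [List.foldl_cons, List.map_cons, ih]
      rw [pvMap_insertBy (Prod.fst : String × List (String × Int) → String)
        (fun a b => decide (a.1 < b.1)) (fun a b => decide (a < b)) (fun a b => rfl) p acc]

lemma pvJoin_sandwich (rows : List (List Char)) (h t : List Char) :
    PySem.Chars.join ['\n'] (h :: (rows ++ [t]))
      = h ++ ['\n'] ++ rows.flatMap (fun r => r ++ ['\n']) ++ t := by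
  induction rows generalizing h with
  | nil => simp [PySem.Chars.join_cons_cons, PySem.Chars.join_singleton]
  | cons r rs ih =>
      simp only [List.cons_append, PySem.Chars.join_cons_cons, List.flatMap_cons]
      rw [ih r]
      simp [List.append_assoc]

lemma pvValuesSum (s : List (String × List (String × Int))) (hs : s ≠ []) :
    (s.foldl (fun d p => pvAddTot d p.2) PySem.Dict.empty).values.sum
      = (pvLevels.map (fun lvl => pvColSum s lvl)).sum := by
  obtain ⟨p, rest, rfl⟩ := List.exists_cons_of_ne_nil hs
  have hk : ((p :: rest).foldl (fun d p => pvAddTot d p.2) PySem.Dict.empty).keys = pvLevels := by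
    simp only [List.foldl_cons]
    exact pvKeys_foldl rest _ (pvKeys_addTot_empty p.2)
  rw [PySem.Dict.values_eq_map_keys _ (by rw [hk]; decide) 0, hk]
  congr 1
  refine List.map_congr_left (fun lvl hl => ?_)
  rw [pvGetD_foldl _ _ _ hl, PySem.Dict.getD_empty]
  simp [pvColSum]

-- transpose of six columns of shape top :: hs.map fj ++ [bot]
lemma pvZipNAux_six {α β : Type} (hs : List α)
    (f0 f1 f2 f3 f4 f5 : α → β) (b0 b1 b2 b3 b4 b5 : β) :
    pvZipNAux (hs.map f0 ++ [b0])
      [hs.map f1 ++ [b1], hs.map f2 ++ [b2], hs.map f3 ++ [b3],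
       hs.map f4 ++ [b4], hs.map f5 ++ [b5]]
      = hs.map (fun h => [f0 h, f1 h, f2 h, f3 h, f4 h, f5 h]) ++ [[b0, b1, b2, b3, b4, b5]] := by
  induction hs with
  | nil => simp [pvZipNAux, pvHeadsTails]
  | cons h hs ih => simp [pvZipNAux, pvHeadsTails, ih]

lemma pvZipN_six {α β : Type} (hs : List α)
    (a0 a1 a2 a3 a4 a5 : β) (f0 f1 f2 f3 f4 f5 : α → β) (b0 b1 b2 b3 b4 b5 : β) :
    pvZipN [a0 :: (hs.map f0 ++ [b0]), a1 :: (hs.map f1 ++ [b1]), a2 :: (hs.map f2 ++ [b2]),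
            a3 :: (hs.map f3 ++ [b3]), a4 :: (hs.map f4 ++ [b4]), a5 :: (hs.map f5 ++ [b5])]
      = [a0, a1, a2, a3, a4, a5]
        :: (hs.map (fun h => [f0 h, f1 h, f2 h, f3 h, f4 h, f5 h])
        ++ [[b0, b1, b2, b3, b4, b5]]) := by
  simp [pvZipN, pvZipNAux, pvHeadsTails, pvZipNAux_six]

lemma pvTotalsEq (s : List (String × List (String × Int))) :
    0 + pvColSum s "DEBUG" + pvColSum s "INFO" + pvColSum s "WARNING" + pvColSum s "ERROR"
      + pvColSum s "CRITICAL" = (pvLevels.map (fun lvl => pvColSum s lvl)).sum := by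
  simp [pvLevels]
  ring

-- ===== VERDICT (by name: the statement is the Claim_ definition above) =====
theorem assemble_output_spec : Claim_equal_assemble_output := by
  intro data _ hpre
  unfold Spec_assemble_output
  have hperm : (PySem.List.sorted data (fun p => p.1) false).Perm data :=
    PySem.List.sorted_perm data _ false
  have hlookup : ∀ p ∈ PySem.List.sorted data (fun p => p.1) false,
      (PySem.Dict.mk data).get? p.1 = some p.2 := by
    intro p hp
    refine PySem.Dict.get?_of_mem_items (d := PySem.Dict.mk data) (k := p.1) (v := p.2) ?_ ?_
    · simpa [PySem.Dict.items] using hperm.mem_iff.1 hp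
    · simpa [PySem.Dict.keys] using hpre.1
  simp only [assemble_output, assemble_output_alt, pvFoldA]
  rw [← pvMap_fst_sorted data]
  set sA := PySem.List.sorted data (fun p => p.1) false with hsA
  have hcol : ∀ lvl : String, (sA.map Prod.fst).map (fun h =>
      PySem.Dict.getD (PySem.Dict.mk (((PySem.Dict.mk data).get? h).getD [])) lvl 0)
      = sA.map (fun p => pvColv p.2 lvl) := by
    intro lvl
    rw [List.map_map]
    exact List.map_congr_left (fun p hp => by simp [Function.comp, hlookup p hp, pvColv])
  -- unfold B's per-level foldl (5 literal levels) and name the column sums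
  simp only [pvLevels, List.foldl_cons, List.foldl_nil, hcol, List.append_assoc, List.cons_append, List.nil_append]
  have hsum : ∀ lvl : String, (sA.map (fun p => pvColv p.2 lvl)).sum = pvColSum sA lvl :=
    fun lvl => rfl
  simp only [hsum]
  -- A's totals dict reads
  have hTotRow : ∀ lvl ∈ pvLevels,
      (sA.foldl (fun d p => pvAddTot d p.2) PySem.Dict.empty).getD lvl 0 = pvColSum sA lvl := by
    intro lvl hl
    rw [pvGetD_foldl _ _ _ hl, PySem.Dict.getD_empty]
    simp [pvColSum]
  have hTR : (sA.foldl (fun d p => pvAddTot d p.2) PySem.Dict.empty).values.sum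
      = 0 + pvColSum sA "DEBUG" + pvColSum sA "INFO" + pvColSum sA "WARNING"
        + pvColSum sA "ERROR" + pvColSum sA "CRITICAL" := by
    rw [pvTotalsEq]
    rcases eq_or_ne sA [] with h | h
    · rw [h]; simp [pvColSum, pvLevels, PySem.Dict.empty]
    · exact pvValuesSum sA h
  rw [hTR]
  simp only [List.map_cons, List.map_nil]
  rw [hTotRow "DEBUG" (by decide), hTotRow "INFO" (by decide), hTotRow "WARNING" (by decide),
      hTotRow "ERROR" (by decide), hTotRow "CRITICAL" (by decide)]
  -- transpose B's six columns
  have hmm : (sA.map Prod.fst).map String.toList = sA.map (fun p => p.1.toList) := by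
    rw [List.map_map]; rfl
  rw [hmm]
  have hmapT : ∀ lvl : String,
      (sA.map (fun p => pvColv p.2 lvl)).map PySem.Int.toChars
        = sA.map (fun p => PySem.Int.toChars (pvColv p.2 lvl)) := by
    intro lvl; rw [List.map_map]; rfl
  simp only [hmapT]
  rw [pvZipN_six]
  -- format the transposed rows and join
  simp only [List.map_cons, List.map_append, List.map_nil, List.zip, List.replicate,
    List.zipWith_cons_cons, List.zipWith_nil_right, List.flatten_cons, List.flatten_nil]
  rw [pvJoin_sandwich]
  simp only [List.map_map, List.flatMap_def]
  congr 2
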